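-- pv_equiv track=rewrite | github.com/asbjborg/climp | scripts/changelog_release.py | normalize_unreleased_body
-- ===== SOURCE A (Python) =====
-- def normalize_unreleased_body(raw_lines: list[str]) -> list[str]:
--     body = raw_lines[:]
--     while body and not body[0].strip():
--         body.pop(0)
--     while body and not body[-1].strip():
--         body.pop()
--     if body and body[-1].strip() == "---":
--         body.pop()
--     while body and not body[-1].strip():
--         body.pop()
--     return body
-- ===== SOURCE B (Python) =====
-- def normalize_unreleased_body(raw_lines: list[str]) -> list[str]:
--     def drop_blank(lines):
--         i = 0
--         while i < len(lines) and not lines[i].strip():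
--             i += 1
--         return lines[i:]
--     rev = drop_blank(drop_blank(raw_lines)[::-1])
--     if rev and rev[0].strip() == "---":
--         rev = drop_blank(rev[1:])
--     return rev[::-1]
-- ===== Notes on version B (the rewrite author's own statement) =====
-- stated objective: alternative
-- what changed: Replaces A's copy-and-mutate with four pop loops (pop(0)/pop()) by a single front drop-while helper applied to the list and then to its reverse, with the '---' check and final trim done on the reversed list before one final reversal.
import Mathlib
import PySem

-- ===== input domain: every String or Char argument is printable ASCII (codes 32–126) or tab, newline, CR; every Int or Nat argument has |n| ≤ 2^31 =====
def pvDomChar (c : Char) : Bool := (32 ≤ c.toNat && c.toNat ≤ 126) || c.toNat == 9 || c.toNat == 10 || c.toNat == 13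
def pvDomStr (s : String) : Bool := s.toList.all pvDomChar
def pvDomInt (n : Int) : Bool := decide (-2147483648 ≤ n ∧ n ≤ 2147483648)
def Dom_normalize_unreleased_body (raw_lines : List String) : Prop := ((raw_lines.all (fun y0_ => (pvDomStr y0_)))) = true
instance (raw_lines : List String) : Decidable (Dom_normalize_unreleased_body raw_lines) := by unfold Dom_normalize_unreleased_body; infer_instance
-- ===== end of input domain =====

-- B replaces A's four in-place pop loops with one front drop-while applied to the list and to its
-- reverse (objective: alternative decomposition; return value only — A mutates only its local copy).

-- ===== PORT A =====
-- 'not s.strip()' (blank line test)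
def pvBlank (s : String) : Bool := PySem.Str.strip s == ""

-- 'while body and not body[0].strip(): body.pop(0)'
def pvTrimFront : List String → List String
  | [] => []
  | s :: t => if pvBlank s then pvTrimFront t else s :: t

-- 'while body and not body[-1].strip(): body.pop()'
def pvTrimBack (l : List String) : List String :=
  if h : l = [] then l
  else if pvBlank (l.getLast h) then pvTrimBack l.dropLast else l
termination_by l.length
decreasing_by
  simp only [List.length_dropLast]
  exact Nat.sub_lt (List.length_pos_iff.mpr h) Nat.one_pos

def normalize_unreleased_body (raw_lines : List String) : List String :=
  let body := raw_lines             -- raw_lines[:]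
  let body := pvTrimFront body
  let body := pvTrimBack body
  let body :=
    if h : body ≠ [] then
      if PySem.Str.strip (body.getLast h) == "---" then body.dropLast else body
    else body
  pvTrimBack body

-- ===== PORT B =====
-- helper drop_blank: skip leading blank lines, return the suffix
def pvDropBlank : List String → List String
  | [] => []
  | s :: t => if pvBlank s then pvDropBlank t else s :: t

def normalize_unreleased_body_alt (raw_lines : List String) : List String :=
  let rev := pvDropBlank ((pvDropBlank raw_lines).reverse)
  let rev2 :=
    match rev with
    | [] => rev
    | h :: t => if PySem.Str.strip h == "---" then pvDropBlank t else rev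
  rev2.reverse

-- ===== PRECONDITION & SPEC =====
def Spec_normalize_unreleased_body (raw_lines : List String) (out : List String) : Prop := out = normalize_unreleased_body_alt raw_lines
instance (raw_lines : List String) (out : List String) : Decidable (Spec_normalize_unreleased_body raw_lines out) := by unfold Spec_normalize_unreleased_body; infer_instance

-- ===== CLAIM (what is proved, stated in full; the proofs are below) =====
def Claim_equal_normalize_unreleased_body : Prop := ∀ (raw_lines : List String), Dom_normalize_unreleased_body raw_lines → Spec_normalize_unreleased_body raw_lines (normalize_unreleased_body raw_lines)

-- ===== LEMMAS AND PROOFS =====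

theorem pvDropBlank_eq_dropWhile (l : List String) :
    pvDropBlank l = l.dropWhile pvBlank := by
  induction l with
  | nil => rfl
  | cons s t ih =>
    simp only [pvDropBlank, List.dropWhile]
    by_cases h : pvBlank s <;> simp [h, ih]

theorem pvTrimFront_eq_pvDropBlank (l : List String) :
    pvTrimFront l = pvDropBlank l := by
  induction l with
  | nil => rfl
  | cons s t ih =>
    simp only [pvTrimFront, pvDropBlank]
    by_cases h : pvBlank s <;> simp [h, ih]

theorem pvDropBlank_idem (l : List String) :
    pvDropBlank (pvDropBlank l) = pvDropBlank l := by
  induction l with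
  | nil => rfl
  | cons s t ih =>
    simp only [pvDropBlank]
    by_cases h : pvBlank s
    · simp [h, ih]
    · simp [pvDropBlank, h]

theorem pvTrimBack_eq (l : List String) :
    pvTrimBack l = (pvDropBlank l.reverse).reverse := by
  rw [pvDropBlank_eq_dropWhile]
  by_cases h : l = []
  · subst h; rw [pvTrimBack]; simp
  · rw [pvTrimBack, dif_neg h]
    have hrev : l.reverse = l.getLast h :: l.dropLast.reverse := by
      conv_lhs => rw [← List.dropLast_concat_getLast h]
      simp
    by_cases hb : pvBlank (l.getLast h)
    · rw [if_pos hb, pvTrimBack_eq l.dropLast, hrev, List.dropWhile_cons, if_pos hb,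
        pvDropBlank_eq_dropWhile]
    · rw [if_neg hb, hrev, List.dropWhile_cons, if_neg hb]
      simp [← hrev]
termination_by l.length
decreasing_by
  simp only [List.length_dropLast]
  exact Nat.sub_lt (List.length_pos_iff.mpr h) Nat.one_pos

-- the common core: both sides as a function of the doubly-trimmed middle list r (r = pvDropBlank r)
theorem pv_core (r : List String) (hfix : pvDropBlank r = r) :
    (pvDropBlank
        (if h : r.reverse ≠ [] then
            if PySem.Str.strip (r.reverse.getLast (by simpa using h)) == "---" then
              r.reverse.dropLast
            else r.reverse
          else r.reverse).reverse).reverse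
    = (match r with
       | [] => r
       | h :: t => if PySem.Str.strip h == "---" then pvDropBlank t else r).reverse := by
  cases r with
  | nil => simp [pvDropBlank]
  | cons h t =>
    have hne : (h :: t).reverse ≠ [] := by simp
    rw [dif_pos hne]
    simp only [List.getLast_eq_head_reverse, List.reverse_reverse, List.head_cons,
      List.dropLast_reverse, List.tail_cons]
    by_cases hd : PySem.Str.strip h == "---"
    · simp [hd]
    · rw [if_neg hd]
      simp only [List.reverse_reverse, hfix]
      simp [hd]

-- ===== VERDICT (by name: the statement is the Claim_ definition above) =====
theorem normalize_unreleased_body_spec : Claim_equal_normalize_unreleased_body := by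
  intro raw _
  show normalize_unreleased_body raw = normalize_unreleased_body_alt raw
  unfold normalize_unreleased_body normalize_unreleased_body_alt
  simp only [pvTrimFront_eq_pvDropBlank, pvTrimBack_eq]
  exact pv_core _ (pvDropBlank_idem _)
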